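-- pv_equiv track=rewrite | github.com/ellismckenzielee/codewars-python | strong_number_special_numbers_series_2.py | strong_num
-- ===== SOURCE A (Python) =====
-- def strong_num(number):
--     total = 0
--     for num in list(map(int, str(number))):
--         total2 = 1
--         for x in range(1, num+1):
--             total2 *= x
--         total += total2
--     return 'STRONG!!!!' if total == number else 'Not Strong !!'
-- ===== SOURCE B (Python) =====
-- def _fact(n):
--     return 1 if n <= 1 else n * _fact(n - 1)
--
--
-- def strong_num(number):
--     counts = {}
--     for ch in str(number):
--         counts[ch] = counts.get(ch, 0) + 1
--     total = sum(_fact(int(d)) * c for d, c in counts.items())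
--     return 'STRONG!!!!' if total == number else 'Not Strong !!'
-- ===== Notes on version B (the rewrite author's own statement) =====
-- stated objective: alternative
-- what changed: B builds a digit histogram of str(number) first and computes the total as a weighted sum factorial(digit)*count over the distinct digits (with a recursive factorial), instead of A's per-character pass that recomputes each factorial by an inner range-product loop.
import Mathlib
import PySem

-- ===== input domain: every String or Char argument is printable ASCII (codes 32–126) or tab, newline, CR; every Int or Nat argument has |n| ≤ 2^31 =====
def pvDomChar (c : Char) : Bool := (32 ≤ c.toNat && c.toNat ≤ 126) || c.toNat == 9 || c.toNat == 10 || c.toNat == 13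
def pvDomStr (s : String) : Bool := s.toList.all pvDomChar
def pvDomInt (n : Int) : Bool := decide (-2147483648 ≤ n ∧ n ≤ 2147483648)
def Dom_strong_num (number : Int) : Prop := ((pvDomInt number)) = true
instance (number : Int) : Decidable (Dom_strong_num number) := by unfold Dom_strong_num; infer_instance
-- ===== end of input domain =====

-- B aggregates factorial(digit)*count over a digit histogram of str(number) instead of A's per-character inner factorial loops; same cost, different decomposition.


-- ===== PORT A =====
-- int(ch) for a single character: PySem.Int.ofStr?; the .getD 0 default is unreachable
-- under Pre_ (str of a nonnegative int consists of digit characters only).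
def pvIntOfChar (c : Char) : Int := (PySem.Int.ofStr? (String.ofList [c])).getD 0

-- A's accumulation loop (total, with the inner range-product factorial loop inline)
def pvTotalA (number : Int) : Int :=
  ((PySem.Int.toStr number).toList.map pvIntOfChar).foldl
    (fun total num =>
      total + (PySem.List.pyRange 1 (num + 1) 1).foldl (fun total2 x => total2 * x) 1)
    0

def strong_num (number : Int) : String :=
  if pvTotalA number = number then "STRONG!!!!" else "Not Strong !!"

-- ===== PORT B =====
-- _fact(n): recursive factorial from Source B
def pvFactAlt (n : Int) : Int :=
  if n ≤ 1 then 1 else n * pvFactAlt (n - 1)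
termination_by n.toNat
decreasing_by omega

-- B's histogram loop (counts = {}; counts[ch] = counts.get(ch, 0) + 1)
def pvCountsB (number : Int) : PySem.Dict Char Int :=
  (PySem.Int.toStr number).toList.foldl
    (fun d ch => d.insert ch (d.getD ch 0 + 1)) PySem.Dict.empty

def strong_num_alt (number : Int) : String :=
  let total := ((pvCountsB number).items.map (fun p => pvFactAlt (pvIntOfChar p.1) * p.2)).sum
  if total = number then "STRONG!!!!" else "Not Strong !!"

-- ===== PRECONDITION & SPEC =====
-- Pre_ excludes negative numbers: there str(number) starts with '-' and A's int('-') raises ValueError (B raises too).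
def Pre_strong_num (number : Int) : Prop := 0 ≤ number
instance (number : Int) : Decidable (Pre_strong_num number) := by unfold Pre_strong_num; infer_instance
def pvWitness_strong_num : Int := (145)

def Spec_strong_num (number : Int) (out : String) : Prop := out = strong_num_alt number
instance (number : Int) (out : String) : Decidable (Spec_strong_num number out) := by unfold Spec_strong_num; infer_instance

-- ===== CLAIM (what is proved, stated in full; the proofs are below) =====
def Claim_equal_strong_num : Prop := ∀ (number : Int), Dom_strong_num number → Pre_strong_num number → Spec_strong_num number (strong_num number)

-- ===== LEMMAS AND PROOFS =====

-- A's inner range-product loop computes B's recursive factorial (for every Int, both are 1 when d ≤ 1).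
theorem pyloop_fact_eq (d : Int) :
    (PySem.List.pyRange 1 (d + 1) 1).foldl (fun total2 x => total2 * x) 1 = pvFactAlt d := by
  rw [pvFactAlt]
  by_cases h : d ≤ 1
  · rcases lt_or_eq_of_le h with h1 | h1
    · rw [PySem.List.pyRange_one_eq_nil (by omega)]
      simp [h]
    · rw [show d + 1 = 1 + 1 by omega, PySem.List.pyRange_one_singleton]
      simp [h]
  · have ih := pyloop_fact_eq (d - 1)
    rw [PySem.List.pyRange_one_succ_right (by omega)]
    rw [List.foldl_append]
    simp only [List.foldl_cons, List.foldl_nil]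
    rw [show d - 1 + 1 = d by ring] at ih
    rw [ih]
    simp [h, mul_comm]
termination_by d.toNat
decreasing_by omega

-- a nodup list containing x: summing an indicator at x picks out f x
theorem sum_ite_single (f : Char → Int) (x : Char) :
    ∀ l : List Char, l.Nodup → x ∈ l →
      (l.map (fun k => if k = x then f k else 0)).sum = f x := by
  intro l
  induction l with
  | nil => intro _ hx; cases hx
  | cons a t ih =>
    intro hnd hx
    simp only [List.map_cons, List.sum_cons]
    by_cases ha : a = x
    · have hx' : x ∉ t := ha ▸ (List.nodup_cons.mp hnd).1
      have hz : (t.map (fun k => if k = x then f k else 0)).sum = 0 := by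
        have hall : ∀ k ∈ t, (if k = x then f k else 0) = 0 := by
          intro k hk
          have : k ≠ x := fun hkx => hx' (hkx ▸ hk)
          simp [this]
        rw [List.map_congr_left hall]
        simp
      simp [ha, hz]
    · have hx' : x ∈ t := by
        rcases List.mem_cons.mp hx with h | h
        · exact absurd h.symm ha
        · exact h
      rw [ih (List.nodup_cons.mp hnd).2 hx']
      simp [ha]

-- the histogram-weighted sum over distinct elements equals the plain sum over the list
theorem weighted_sum_eq (f : Char → Int) :
    ∀ xs : List Char,
      ((PySem.Set.ofList xs).map (fun k => f k * xs.count k)).sum = (xs.map f).sum := by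
  intro xs
  induction xs using List.reverseRecOn with
  | nil => simp [PySem.Set.ofList_nil]
  | append_singleton t x ih =>
    have hcnt : ∀ k, (t ++ [x]).count k = t.count k + (if k = x then 1 else 0) := by
      intro k
      by_cases h : k = x
      · simp [List.count_append, h]
      · simp [List.count_append, List.count_eq_zero, h]
    rw [PySem.Set.ofList_append_singleton, PySem.Set.add_eq_ite]
    by_cases hx : x ∈ PySem.Set.ofList t
    · have hxt : x ∈ t := (PySem.Set.mem_ofList _ _).mp hx
      simp only [hx, if_pos]
      have hsplit : ∀ k, f k * (t ++ [x]).count k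
          = f k * t.count k + (if k = x then f k else 0) := by
        intro k
        rw [hcnt k]
        by_cases h : k = x
        · simp [h]; ring
        · simp [h]
      rw [List.map_congr_left (fun k _ => hsplit k)]
      rw [show (fun k => f k * (t.count k : Int) + (if k = x then f k else 0))
            = (fun k => (fun k => f k * (t.count k : Int)) k + (fun k => if k = x then f k else 0) k) from rfl]
      rw [List.sum_map_add]
      rw [ih, sum_ite_single f x _ (PySem.Set.nodup_ofList _) hx]
      simp
    · have hxt : x ∉ t := fun h => hx ((PySem.Set.mem_ofList _ _).mpr h)
      simp only [hx, if_neg, not_false_iff]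
      rw [List.map_append, List.sum_append]
      have hcong : ∀ k ∈ PySem.Set.ofList t,
          f k * ((t ++ [x]).count k : Int) = f k * t.count k := by
        intro k hk
        have : k ≠ x := fun h => hxt (h ▸ (PySem.Set.mem_ofList _ _).mp hk)
        rw [hcnt k]
        simp [this]
      rw [List.map_congr_left hcong, ih]
      simp [List.count_eq_zero_of_not_mem hxt]

-- ===== VERDICT (by name: the statement is the Claim_ definition above) =====
theorem strong_num_spec : Claim_equal_strong_num := by
  intro number _ _
  unfold Spec_strong_num strong_num strong_num_alt
  have hmain : pvTotalA number
      = ((pvCountsB number).items.map (fun p => pvFactAlt (pvIntOfChar p.1) * p.2)).sum := by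
    unfold pvTotalA pvCountsB
    rw [PySem.Dict.foldl_insert_getD_add_one_eq_counter, PySem.Dict.items_counter]
    set s := (PySem.Int.toStr number).toList with hs
    rw [PySem.List.foldl_add (g := fun num =>
        (PySem.List.pyRange 1 (num + 1) 1).foldl (fun total2 x => total2 * x) 1)]
    rw [List.map_map, List.map_map]
    have h1 : ((fun num => (PySem.List.pyRange 1 (num + 1) 1).foldl (fun total2 x => total2 * x) 1) ∘ pvIntOfChar)
        = fun c => pvFactAlt (pvIntOfChar c) := by
      funext c
      simp [Function.comp, pyloop_fact_eq]
    rw [h1]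
    have h2 : ((fun p => pvFactAlt (pvIntOfChar p.1) * p.2) ∘ fun k => (k, (s.count k : Int)))
        = fun k => (fun c => pvFactAlt (pvIntOfChar c)) k * s.count k := rfl
    rw [h2, weighted_sum_eq (fun c => pvFactAlt (pvIntOfChar c)) s]
    simp
  rw [hmain]
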